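-- pv_equiv track=rewrite | github.com/W9D1O/ptyping | separador_de_palabras.py | es_derecha
-- ===== SOURCE A (Python) =====
-- def es_derecha(p: str) -> bool:
--     car_der = "67890'¿yuiop´+hjklñ{\\}nm,.-_^&*()\"¡YUIOP¨*HJKLÑ[]NM;:_.óúíü"
--     cd:int = 0
--     ci:int = 0
--
--     for i in range(len(p)):
--         for j in range(len(car_der)):
--             if p[i] == car_der[j]:
--                 cd += 1
--     ci = len(p) - cd
--     return cd > ci
-- ===== SOURCE B (Python) =====
-- def es_derecha(p: str) -> bool:
--     car_der = "67890'\u00bfyuiop\u00b4+hjkl\u00f1{\\}nm,.-_^&*()\"\u00a1YUIOP\u00a8*HJKL\u00d1[]NM;:_.\u00f3\u00fa\u00ed\u00fc"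
--     freq = {}
--     for c in p:
--         freq[c] = freq.get(c, 0) + 1
--     cd = 0
--     for c in car_der:
--         cd += freq.get(c, 0)
--     return 2 * cd > len(p)
-- ===== Notes on version B (the rewrite author's own statement) =====
-- stated objective: faster
-- what changed: B builds a frequency table of p once and scans the fixed alphabet car_der a single time, summing freq[c], instead of A's nested rescan of car_der for every character of p; the majority test becomes 2*cd > len(p).
import Mathlib
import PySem

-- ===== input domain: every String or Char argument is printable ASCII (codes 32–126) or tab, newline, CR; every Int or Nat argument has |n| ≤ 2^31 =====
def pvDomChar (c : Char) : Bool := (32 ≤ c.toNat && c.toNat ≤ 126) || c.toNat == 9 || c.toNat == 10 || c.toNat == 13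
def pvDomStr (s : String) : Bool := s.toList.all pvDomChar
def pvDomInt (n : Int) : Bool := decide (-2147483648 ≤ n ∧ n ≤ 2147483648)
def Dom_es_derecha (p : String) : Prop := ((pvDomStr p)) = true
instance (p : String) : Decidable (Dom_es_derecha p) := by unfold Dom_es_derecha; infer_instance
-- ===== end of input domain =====

-- B builds a frequency table of p once and scans the fixed string car_der a single time; faster by a constant factor (one pass instead of nested rescans).

-- ===== PORT A =====
-- nested loops: for each char of p, scan all of car_der and count matches
def es_derecha (p : String) : Bool :=
  let car_der : List Char := "67890'¿yuiop´+hjklñ{\\}nm,.-_^&*()\"¡YUIOP¨*HJKLÑ[]NM;:_.óúíü".toList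
  let cd : Int := p.toList.foldl
    (fun cd c => car_der.foldl (fun cd d => if c = d then cd + 1 else cd) cd) 0
  let ci : Int := (p.toList.length : Int) - cd
  decide (cd > ci)

-- ===== PORT B =====
-- histogram of p (dict get-default + insert), then one scan of car_der summing freq.get(c, 0)
def es_derecha_alt (p : String) : Bool :=
  let car_der : List Char := "67890'¿yuiop´+hjklñ{\\}nm,.-_^&*()\"¡YUIOP¨*HJKLÑ[]NM;:_.óúíü".toList
  let freq : PySem.Dict Char Int :=
    p.toList.foldl (fun d c => d.insert c (d.getD c 0 + 1)) PySem.Dict.empty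
  let cd : Int := car_der.foldl (fun cd c => cd + freq.getD c 0) 0
  decide (2 * cd > (p.toList.length : Int))

-- ===== PRECONDITION & SPEC =====
def Spec_es_derecha (p : String) (out : Bool) : Prop := out = es_derecha_alt p
instance (p : String) (out : Bool) : Decidable (Spec_es_derecha p out) := by unfold Spec_es_derecha; infer_instance

-- ===== CLAIM (what is proved, stated in full; the proofs are below) =====
def Claim_equal_es_derecha : Prop := ∀ (p : String), Dom_es_derecha p → Spec_es_derecha p (es_derecha p)

-- ===== LEMMAS AND PROOFS =====

-- count over a cons, cast to Int, with the indicator written on the left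
theorem count_cons_int (x d : Char) (xs : List Char) :
    (((x :: xs).count d : Int)) = (if x = d then (1:Int) else 0) + (xs.count d : Int) := by
  rcases eq_or_ne x d with h | h
  · subst h; simp; omega
  · simp [h]

-- one pass of A's inner loop adds the number of matches of c in ys
theorem inner_count (ys : List Char) (c : Char) (a : Int) :
    ys.foldl (fun cd d => if c = d then cd + 1 else cd) a = a + (ys.count c : Int) := by
  rw [PySem.List.foldl_ite_add_one (p := fun d => c = d)]
  have h : List.countP (fun d => decide (c = d)) ys = ys.count c := by
    apply List.countP_congr
    intro d _
    rcases eq_or_ne c d with h | h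
    · subst h; simp
    · simp [h, Ne.symm h]
  rw [h]

-- a 0/1 indicator summed over ys is the count of x in ys
theorem sum_ite_count (x : Char) (ys : List Char) :
    (ys.map (fun d => if x = d then (1:Int) else 0)).sum = (ys.count x : Int) := by
  induction ys with
  | nil => simp
  | cons y ys ih =>
    simp only [List.map_cons, List.sum_cons, ih]
    rw [count_cons_int y x ys]
    rcases eq_or_ne x y with h | h
    · subst h; simp
    · simp [h, Ne.symm h]

-- double counting: summing ys-counts over xs equals summing xs-counts over ys
theorem sum_count_comm (xs ys : List Char) :
    (xs.map (fun c => (ys.count c : Int))).sum = (ys.map (fun d => (xs.count d : Int))).sum := by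
  induction xs with
  | nil => simp
  | cons x xs ih =>
    calc (((x :: xs).map (fun c => (ys.count c : Int))).sum)
        = (ys.count x : Int) + (xs.map (fun c => (ys.count c : Int))).sum := by simp
      _ = (ys.map (fun d => (if x = d then (1:Int) else 0) + (xs.count d : Int))).sum := by
          rw [ih, List.sum_map_add, sum_ite_count]
      _ = (ys.map (fun d => ((x :: xs).count d : Int))).sum := by
          apply congrArg
          apply List.map_congr_left
          intro d _
          exact (count_cons_int x d xs).symm

-- ===== VERDICT (by name: the statement is the Claim_ definition above) =====
theorem es_derecha_spec : Claim_equal_es_derecha := by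
  intro p _
  unfold Spec_es_derecha es_derecha es_derecha_alt
  simp only [PySem.Dict.foldl_insert_getD_add_one_eq_counter]
  set car_der : List Char := "67890'¿yuiop´+hjklñ{\\}nm,.-_^&*()\"¡YUIOP¨*HJKLÑ[]NM;:_.óúíü".toList with hcd
  have hA : p.toList.foldl
      (fun cd c => car_der.foldl (fun cd d => if c = d then cd + 1 else cd) cd) 0
      = (p.toList.map (fun c => (car_der.count c : Int))).sum := by
    have h0 := PySem.List.foldl_add (l := p.toList)
      (g := fun c => (car_der.count c : Int)) (a := (0:Int))
    rw [zero_add] at h0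
    rw [← h0]
    apply PySem.List.foldl_congr_mem
    intro a c _
    exact inner_count car_der c a
  have hB : car_der.foldl (fun cd c => cd + (PySem.Dict.counter p.toList).getD c 0) 0
      = (car_der.map (fun d => (p.toList.count d : Int))).sum := by
    have h0 := PySem.List.foldl_add (l := car_der)
      (g := fun c => (PySem.Dict.counter p.toList).getD c 0) (a := (0:Int))
    rw [zero_add] at h0
    rw [h0]
    simp [PySem.Dict.getD_counter]
  rw [hA]
  simp only [hB, sum_count_comm p.toList car_der]
  simp only [decide_eq_decide]
  omega
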